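-- pv_equiv track=rewrite | github.com/Bmw4134/TRAXOVO_V1 | qq_enhanced_attendance_matrix.py | _detect_attendance_columns
-- ===== SOURCE A (Python) =====
-- from typing import Dict, List, Any, Optional, Tuple
--
-- def _detect_attendance_columns(columns: List[str]) -> Dict[str, Optional[str]]:
--     """Intelligently detect attendance-related columns"""
--
--     column_mapping = {
--         'employee_name': None,
--         'equipment_id': None,
--         'date': None,
--         'time_in': None,
--         'time_out': None,
--         'job_site': None
--     }
--
--     columns_lower = [str(col).lower() for col in columns]
--
--     # Employee name detection
--     for i, col in enumerate(columns_lower):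
--         if any(term in col for term in ['name', 'employee', 'driver', 'operator']):
--             column_mapping['employee_name'] = columns[i]
--             break
--
--     # Equipment detection
--     for i, col in enumerate(columns_lower):
--         if any(term in col for term in ['equipment', 'unit', 'asset', 'vehicle']):
--             column_mapping['equipment_id'] = columns[i]
--             break
--
--     # Date detection
--     for i, col in enumerate(columns_lower):
--         if any(term in col for term in ['date', 'day']):
--             column_mapping['date'] = columns[i]
--             break
--
--     # Time in detection
--     for i, col in enumerate(columns_lower):
--         if any(term in col for term in ['time_in', 'start', 'begin', 'in']):
--             column_mapping['time_in'] = columns[i]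
--             break
--
--     # Time out detection
--     for i, col in enumerate(columns_lower):
--         if any(term in col for term in ['time_out', 'end', 'finish', 'out']):
--             column_mapping['time_out'] = columns[i]
--             break
--
--     # Job site detection
--     for i, col in enumerate(columns_lower):
--         if any(term in col for term in ['job', 'site', 'location', 'project']):
--             column_mapping['job_site'] = columns[i]
--             break
--
--     return column_mapping
-- ===== SOURCE B (Python) =====
-- def _detect_attendance_columns(columns):
--     """Single pass over the columns with a role->terms table instead of six separate scans."""
--     role_terms = [
--         ('employee_name', ['name', 'employee', 'driver', 'operator']),
--         ('equipment_id', ['equipment', 'unit', 'asset', 'vehicle']),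
--         ('date', ['date', 'day']),
--         ('time_in', ['time_in', 'start', 'begin', 'in']),
--         ('time_out', ['time_out', 'end', 'finish', 'out']),
--         ('job_site', ['job', 'site', 'location', 'project']),
--     ]
--     mapping = {role: None for role, _ in role_terms}
--     for col in columns:
--         low = str(col).lower()
--         for role, terms in role_terms:
--             if mapping[role] is None and any(term in low for term in terms):
--                 mapping[role] = col
--     return mapping
-- ===== Notes on version B (the rewrite author's own statement) =====
-- stated objective: simpler
-- what changed: Replaces six separate first-match scans over the column list by one pass over the columns driven by a role->terms table, filling each still-empty role slot on its first hit.
import Mathlib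
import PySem

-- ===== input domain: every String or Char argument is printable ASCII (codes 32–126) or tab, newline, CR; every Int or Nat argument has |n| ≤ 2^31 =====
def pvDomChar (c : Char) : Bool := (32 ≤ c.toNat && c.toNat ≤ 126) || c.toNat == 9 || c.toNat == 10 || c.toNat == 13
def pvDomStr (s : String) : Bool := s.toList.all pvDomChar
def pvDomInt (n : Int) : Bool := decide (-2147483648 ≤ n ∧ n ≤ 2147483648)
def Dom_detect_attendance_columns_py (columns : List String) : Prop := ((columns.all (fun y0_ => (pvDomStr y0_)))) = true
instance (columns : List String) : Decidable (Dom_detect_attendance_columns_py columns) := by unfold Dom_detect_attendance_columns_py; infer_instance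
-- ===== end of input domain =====

-- B replaces A's six separate break-on-first-match scans by one pass over the columns
-- driven by a role -> terms table (objective: simpler decomposition; same result).

-- ===== PORT A =====
-- A's per-role loop: scan (original, lowered) pairs, return first original whose lowered form
-- contains one of the terms ('break' = stop at first hit).
def pvFindA (terms : List String) : List (String × String) → Option String
  | [] => none
  | (orig, low) :: rest =>
      if terms.any (fun t => PySem.Str.isIn t low) then some orig else pvFindA terms rest

def detect_attendance_columns_py (columns : List String) : List (String × Option String) :=
  -- columns_lower = [str(col).lower() for col in columns]; str is identity on strings
  let pairs := columns.zip (columns.map (fun c => PySem.Str.lower c))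
  [ ("employee_name", pvFindA ["name", "employee", "driver", "operator"] pairs),
    ("equipment_id", pvFindA ["equipment", "unit", "asset", "vehicle"] pairs),
    ("date", pvFindA ["date", "day"] pairs),
    ("time_in", pvFindA ["time_in", "start", "begin", "in"] pairs),
    ("time_out", pvFindA ["time_out", "end", "finish", "out"] pairs),
    ("job_site", pvFindA ["job", "site", "location", "project"] pairs) ]

-- ===== PORT B =====
-- one slot update: assign the original column only if the slot is still empty and a term hits
def pvSlotB (terms : List String) (o : Option String) (orig low : String) : Option String :=
  match o with
  | some x => some x
  | none => if terms.any (fun t => PySem.Str.isIn t low) then some orig else none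

-- B's single pass: fold over the columns, lowering each once, updating all six role slots
def pvStepB (s : Option String × Option String × Option String × Option String × Option String × Option String)
    (col : String) :
    Option String × Option String × Option String × Option String × Option String × Option String :=
  let low := PySem.Str.lower col
  ( pvSlotB ["name", "employee", "driver", "operator"] s.1 col low,
    pvSlotB ["equipment", "unit", "asset", "vehicle"] s.2.1 col low,
    pvSlotB ["date", "day"] s.2.2.1 col low,
    pvSlotB ["time_in", "start", "begin", "in"] s.2.2.2.1 col low,
    pvSlotB ["time_out", "end", "finish", "out"] s.2.2.2.2.1 col low,
    pvSlotB ["job", "site", "location", "project"] s.2.2.2.2.2 col low )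

def detect_attendance_columns_py_alt (columns : List String) : List (String × Option String) :=
  let s := columns.foldl pvStepB (none, none, none, none, none, none)
  [ ("employee_name", s.1), ("equipment_id", s.2.1), ("date", s.2.2.1),
    ("time_in", s.2.2.2.1), ("time_out", s.2.2.2.2.1), ("job_site", s.2.2.2.2.2) ]

-- ===== PRECONDITION & SPEC =====
def Spec_detect_attendance_columns_py (columns : List String) (out : List (String × Option String)) : Prop := out = detect_attendance_columns_py_alt columns
instance (columns : List String) (out : List (String × Option String)) : Decidable (Spec_detect_attendance_columns_py columns out) := by unfold Spec_detect_attendance_columns_py; infer_instance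

-- ===== CLAIM (what is proved, stated in full; the proofs are below) =====
def Claim_equal_detect_attendance_columns_py : Prop := ∀ (columns : List String), Dom_detect_attendance_columns_py columns → Spec_detect_attendance_columns_py columns (detect_attendance_columns_py columns)

-- ===== LEMMAS AND PROOFS =====

-- folding one slot alone: a filled slot stays; an empty slot gets the first match
theorem pvFoldSlot (terms : List String) (cols : List String) (o : Option String) :
    cols.foldl (fun o c => pvSlotB terms o c (PySem.Str.lower c)) o
      = match o with
        | some x => some x
        | none => pvFindA terms (cols.zip (cols.map (fun c => PySem.Str.lower c))) := by
  induction cols generalizing o with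
  | nil => cases o <;> rfl
  | cons c rest ih =>
      rw [List.foldl_cons, ih]
      cases o with
      | some x => rfl
      | none =>
          simp only [pvSlotB, List.map_cons, List.zip_cons_cons, pvFindA]
          by_cases h : (terms.any fun t => PySem.Str.isIn t (PySem.Str.lower c)) = true
          · rw [if_pos h, if_pos h]
          · rw [if_neg h, if_neg h]

-- the 6-tuple fold is the tuple of the six single-slot folds
theorem pvFoldTuple (cols : List String)
    (s : Option String × Option String × Option String × Option String × Option String × Option String) :
    cols.foldl pvStepB s
      = ( cols.foldl (fun o c => pvSlotB ["name", "employee", "driver", "operator"] o c (PySem.Str.lower c)) s.1,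
          cols.foldl (fun o c => pvSlotB ["equipment", "unit", "asset", "vehicle"] o c (PySem.Str.lower c)) s.2.1,
          cols.foldl (fun o c => pvSlotB ["date", "day"] o c (PySem.Str.lower c)) s.2.2.1,
          cols.foldl (fun o c => pvSlotB ["time_in", "start", "begin", "in"] o c (PySem.Str.lower c)) s.2.2.2.1,
          cols.foldl (fun o c => pvSlotB ["time_out", "end", "finish", "out"] o c (PySem.Str.lower c)) s.2.2.2.2.1,
          cols.foldl (fun o c => pvSlotB ["job", "site", "location", "project"] o c (PySem.Str.lower c)) s.2.2.2.2.2 ) := by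
  induction cols generalizing s with
  | nil => rfl
  | cons c rest ih => simp only [List.foldl_cons, ih]; rfl

-- ===== VERDICT (by name: the statement is the Claim_ definition above) =====
theorem detect_attendance_columns_py_spec : Claim_equal_detect_attendance_columns_py := by
  intro columns _
  unfold Spec_detect_attendance_columns_py detect_attendance_columns_py detect_attendance_columns_py_alt
  simp only [pvFoldTuple, pvFoldSlot]
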